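-- pv_equiv track=rewrite | github.com/ShanjayPiranav/FitRec-AI | project/rl_agent.py | _encode_goals
-- ===== SOURCE A (Python) =====
-- from typing import List, Dict, Tuple, Optional
--
-- def _encode_goals(goals: str) -> List[int]:
--     """Encode fitness goals as binary features"""
--     goal_list = goals.lower().split(',') if goals else []
--     goal_encoding = {
--         'weight_loss': [1, 0, 0, 0],
--         'muscle_gain': [0, 1, 0, 0],
--         'endurance': [0, 0, 1, 0],
--         'flexibility': [0, 0, 0, 1]
--     }
--
--     encoded = [0, 0, 0, 0]
--     for goal in goal_list:
--         goal = goal.strip()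
--         if goal in goal_encoding:
--             encoded = [max(a, b) for a, b in zip(encoded, goal_encoding[goal])]
--     return encoded
-- ===== SOURCE B (Python) =====
-- from typing import List
--
-- def _encode_goals(goals: str) -> List[int]:
--     """Encode fitness goals as binary features"""
--     present = {g.strip() for g in (goals.lower().split(',') if goals else [])}
--     return [1 if key in present else 0
--             for key in ('weight_loss', 'muscle_gain', 'endurance', 'flexibility')]
-- ===== Notes on version B (the rewrite author's own statement) =====
-- stated objective: idiomatic
-- what changed: B builds a set of the stripped lower-cased goals once and maps the four fixed category keys through a membership test, instead of iterating over the input goals and OR-merging fixed bit-vectors with max/zip.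
import Mathlib
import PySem

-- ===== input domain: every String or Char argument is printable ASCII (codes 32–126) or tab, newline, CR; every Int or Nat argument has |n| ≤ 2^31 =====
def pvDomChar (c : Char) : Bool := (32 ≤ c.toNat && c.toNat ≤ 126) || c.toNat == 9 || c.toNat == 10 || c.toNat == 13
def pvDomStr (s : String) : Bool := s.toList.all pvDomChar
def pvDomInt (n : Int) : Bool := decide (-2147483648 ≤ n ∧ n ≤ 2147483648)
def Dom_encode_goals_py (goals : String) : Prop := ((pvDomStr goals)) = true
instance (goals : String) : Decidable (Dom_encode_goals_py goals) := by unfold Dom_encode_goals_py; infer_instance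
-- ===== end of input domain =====

-- B builds the set of stripped goals once and maps the four fixed category keys through a
-- membership test, instead of folding fixed bit-vectors over the input goals with max/zip (idiomatic).


-- ===== PORT A =====
def pvGoalEncoding : PySem.Dict String (List Int) :=
  PySem.Dict.ofList [("weight_loss", [1, 0, 0, 0]), ("muscle_gain", [0, 1, 0, 0]),
                     ("endurance", [0, 0, 1, 0]), ("flexibility", [0, 0, 0, 1])]

def pvStepA (encoded : List Int) (goal : String) : List Int :=
  let g := PySem.Str.strip goal
  if pvGoalEncoding.contains g then
    (encoded.zip (pvGoalEncoding.getD g [])).map (fun p => max p.1 p.2)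
  else encoded

def encode_goals_py (goals : String) : List Int :=
  let goal_list : List String :=
    if goals ≠ "" then (PySem.Str.split? (PySem.Str.lower goals) ",").getD [] else []
  goal_list.foldl pvStepA [0, 0, 0, 0]

-- ===== PORT B =====
def encode_goals_py_alt (goals : String) : List Int :=
  let present : PySem.Set String :=
    PySem.Set.ofList ((if goals ≠ "" then (PySem.Str.split? (PySem.Str.lower goals) ",").getD []
                       else []).map PySem.Str.strip)
  ["weight_loss", "muscle_gain", "endurance", "flexibility"].map
    (fun key => if PySem.Set.contains present key then (1 : Int) else 0)

-- ===== PRECONDITION & SPEC =====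
def Spec_encode_goals_py (goals : String) (out : List Int) : Prop := out = encode_goals_py_alt goals
instance (goals : String) (out : List Int) : Decidable (Spec_encode_goals_py goals out) := by unfold Spec_encode_goals_py; infer_instance

-- ===== CLAIM (what is proved, stated in full; the proofs are below) =====
def Claim_equal_encode_goals_py : Prop := ∀ (goals : String), Dom_encode_goals_py goals → Spec_encode_goals_py goals (encode_goals_py goals)

-- ===== LEMMAS AND PROOFS =====

theorem pvContains (g : String) : pvGoalEncoding.contains g =
    (g == "weight_loss" || g == "muscle_gain" || g == "endurance" || g == "flexibility") := by
  simp only [pvGoalEncoding, PySem.Dict.ofList, PySem.Dict.update, List.foldl,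
    PySem.Dict.contains_insert, PySem.Dict.contains_empty, Bool.or_false]
  cases g == "weight_loss" <;> cases g == "muscle_gain" <;> cases g == "endurance" <;>
    cases g == "flexibility" <;> rfl

theorem pvGetD (g : String) : pvGoalEncoding.getD g [] =
    (if g = "weight_loss" then [1, 0, 0, 0] else if g = "muscle_gain" then [0, 1, 0, 0]
     else if g = "endurance" then [0, 0, 1, 0] else if g = "flexibility" then [0, 0, 0, 1]
     else []) := by
  simp only [pvGoalEncoding, PySem.Dict.ofList, PySem.Dict.update, List.foldl,
    PySem.Dict.getD_insert, PySem.Dict.getD_empty]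
  split_ifs <;> simp_all

-- one step of A's fold, written out by cases on the stripped goal
theorem pvStepA_eq (b1 b2 b3 b4 : Int) (g : String) :
    pvStepA [b1, b2, b3, b4] g =
      (if PySem.Str.strip g = "weight_loss" then [max b1 1, max b2 0, max b3 0, max b4 0]
       else if PySem.Str.strip g = "muscle_gain" then [max b1 0, max b2 1, max b3 0, max b4 0]
       else if PySem.Str.strip g = "endurance" then [max b1 0, max b2 0, max b3 1, max b4 0]
       else if PySem.Str.strip g = "flexibility" then [max b1 0, max b2 0, max b3 0, max b4 1]
       else [b1, b2, b3, b4]) := by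
  simp only [pvStepA, pvContains, pvGetD]
  split_ifs <;> simp_all [List.zip]

-- the fold over the goal list computes, coordinatewise, membership of the four keys
theorem pv_loop (gl : List String) (b1 b2 b3 b4 : Int)
    (h1 : b1 = 0 ∨ b1 = 1) (h2 : b2 = 0 ∨ b2 = 1) (h3 : b3 = 0 ∨ b3 = 1) (h4 : b4 = 0 ∨ b4 = 1) :
    gl.foldl pvStepA [b1, b2, b3, b4] =
      [if b1 = 1 ∨ "weight_loss" ∈ gl.map PySem.Str.strip then 1 else 0,
       if b2 = 1 ∨ "muscle_gain" ∈ gl.map PySem.Str.strip then 1 else 0,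
       if b3 = 1 ∨ "endurance" ∈ gl.map PySem.Str.strip then 1 else 0,
       if b4 = 1 ∨ "flexibility" ∈ gl.map PySem.Str.strip then 1 else 0] := by
  induction gl generalizing b1 b2 b3 b4 with
  | nil =>
    simp only [List.foldl_nil, List.map_nil, List.not_mem_nil, or_false]
    rcases h1 with h1 | h1 <;> rcases h2 with h2 | h2 <;> rcases h3 with h3 | h3 <;>
      rcases h4 with h4 | h4 <;> simp [h1, h2, h3, h4]
  | cons g gl ih =>
    have m1 : max b1 (1 : Int) = 1 := by omega
    have m2 : max b2 (1 : Int) = 1 := by omega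
    have m3 : max b3 (1 : Int) = 1 := by omega
    have m4 : max b4 (1 : Int) = 1 := by omega
    have n1 : max b1 (0 : Int) = b1 := by omega
    have n2 : max b2 (0 : Int) = b2 := by omega
    have n3 : max b3 (0 : Int) = b3 := by omega
    have n4 : max b4 (0 : Int) = b4 := by omega
    simp only [List.foldl_cons, List.map_cons, List.mem_cons, pvStepA_eq]
    by_cases hw : PySem.Str.strip g = "weight_loss"
    · rw [if_pos hw, m1, n2, n3, n4, ih 1 b2 b3 b4 (by omega) h2 h3 h4]
      simp [hw]
    rw [if_neg hw]
    by_cases hm : PySem.Str.strip g = "muscle_gain"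
    · rw [if_pos hm, n1, m2, n3, n4, ih b1 1 b3 b4 h1 (by omega) h3 h4]
      simp [hm]
    rw [if_neg hm]
    by_cases he : PySem.Str.strip g = "endurance"
    · rw [if_pos he, n1, n2, m3, n4, ih b1 b2 1 b4 h1 h2 (by omega) h4]
      simp [he]
    rw [if_neg he]
    by_cases hf : PySem.Str.strip g = "flexibility"
    · rw [if_pos hf, n1, n2, n3, m4, ih b1 b2 b3 1 h1 h2 h3 (by omega)]
      simp [hf]
    rw [if_neg hf, ih b1 b2 b3 b4 h1 h2 h3 h4]
    have W : ("weight_loss" = PySem.Str.strip g) ↔ False := ⟨fun h => hw h.symm, False.elim⟩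
    have M : ("muscle_gain" = PySem.Str.strip g) ↔ False := ⟨fun h => hm h.symm, False.elim⟩
    have E : ("endurance" = PySem.Str.strip g) ↔ False := ⟨fun h => he h.symm, False.elim⟩
    have F : ("flexibility" = PySem.Str.strip g) ↔ False := ⟨fun h => hf h.symm, False.elim⟩
    simp [W, M, E, F]

-- ===== VERDICT (by name: the statement is the Claim_ definition above) =====
theorem encode_goals_py_spec : Claim_equal_encode_goals_py := by
  intro goals _
  unfold Spec_encode_goals_py encode_goals_py encode_goals_py_alt
  rw [pv_loop _ 0 0 0 0 (by omega) (by omega) (by omega) (by omega)]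
  have key : ∀ (k : String) (l : List String),
      (PySem.Set.contains (PySem.Set.ofList l) k = true) ↔ k ∈ l := by
    intro k l
    rw [PySem.Set.contains_iff, PySem.Set.mem_ofList]
  have z : ∀ (P : Prop), (((0:Int) = 1) ∨ P) ↔ P := fun P => by simp
  simp only [key, z]
  rfl
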